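-- pv_equiv track=rewrite | github.com/technoborsch/yandex_algo_training_6.0 | Second/D Best rest/solution.py | solve
-- ===== SOURCE A (Python) =====
-- def solve(n: int, k, tasks: list[int]) -> int:
--     right = 0
--     max_different = 1
--     tasks = sorted(tasks)
--     for i, task in enumerate(tasks):
--         while right < len(tasks) and tasks[right] - task <= k:
--             right += 1
--         max_different = max(max_different, right - i)
--     return max_different
-- ===== SOURCE B (Python) =====
-- def _bisect_right(s, key):
--     lo, hi = 0, len(s)
--     while lo < hi:
--         mid = (lo + hi) // 2
--         if key < s[mid]:
--             hi = mid
--         else: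
--             lo = mid + 1
--     return lo
--
--
-- def solve(n: int, k, tasks: list[int]) -> int:
--     tasks = sorted(tasks)
--     best = 1
--     for i, task in enumerate(tasks):
--         best = max(best, _bisect_right(tasks, task + k) - i)
--     return best
-- ===== Notes on version B (the rewrite author's own statement) =====
-- stated objective: alternative
-- what changed: Replaces A's stateful two-pointer sweep (the carried 'right' index) by an independent per-element binary search: after sorting, each index i locates the end of its window with a hand-written bisect_right, so no state flows between iterations.
import Mathlib
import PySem

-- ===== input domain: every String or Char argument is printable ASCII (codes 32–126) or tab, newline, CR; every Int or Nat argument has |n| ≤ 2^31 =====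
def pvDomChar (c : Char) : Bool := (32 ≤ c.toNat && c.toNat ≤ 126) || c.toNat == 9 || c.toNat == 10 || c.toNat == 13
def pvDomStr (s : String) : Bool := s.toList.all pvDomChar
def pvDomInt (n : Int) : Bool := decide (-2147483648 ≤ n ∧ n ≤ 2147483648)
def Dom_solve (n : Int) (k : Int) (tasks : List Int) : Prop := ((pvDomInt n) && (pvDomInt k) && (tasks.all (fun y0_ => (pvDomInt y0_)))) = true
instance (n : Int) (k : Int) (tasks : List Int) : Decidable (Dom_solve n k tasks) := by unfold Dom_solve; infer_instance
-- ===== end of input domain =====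

-- B replaces A's stateful two-pointer sweep by an independent per-element binary search
-- (hand-written bisect_right) on the sorted list; alternative algorithm, same O(n log n) cost.

-- ===== PORT A =====
-- the inner `while right < len(tasks) and tasks[right] - task <= k: right += 1` loop
def pvAdvance (s : List Int) (t k : Int) (r : Nat) : Nat :=
  if h : r < s.length then
    if s[r] - t ≤ k then pvAdvance s t k (r + 1) else r
  else r
termination_by s.length - r

def solve (n : Int) (k : Int) (tasks : List Int) : Int :=
  let s := PySem.List.sorted tasks (fun x => x) false
  ((PySem.List.enumerate s 0).foldl
    (fun (st : Nat × Int) p =>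
      let r := pvAdvance s p.2 k st.1
      (r, max st.2 ((r : Int) - p.1))) (0, 1)).2

-- ===== PORT B =====
-- hand-written _bisect_right from Source B, step for step (lo/hi halving loop)
def pvBisectRight (s : List Int) (key : Int) (lo hi : Nat) : Nat :=
  if _h : lo < hi then
    let mid := (lo + hi) / 2
    if key < s.getD mid 0 then pvBisectRight s key lo mid
    else pvBisectRight s key (mid + 1) hi
  else lo
termination_by hi - lo

def solve_alt (n : Int) (k : Int) (tasks : List Int) : Int :=
  let s := PySem.List.sorted tasks (fun x => x) false
  (PySem.List.enumerate s 0).foldl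
    (fun best p => max best ((pvBisectRight s (p.2 + k) 0 s.length : Int) - p.1)) 1

-- ===== PRECONDITION & SPEC =====
def Spec_solve (n : Int) (k : Int) (tasks : List Int) (out : Int) : Prop := out = solve_alt n k tasks
instance (n : Int) (k : Int) (tasks : List Int) (out : Int) : Decidable (Spec_solve n k tasks out) := by unfold Spec_solve; infer_instance

-- ===== CLAIM (what is proved, stated in full; the proofs are below) =====
def Claim_equal_solve : Prop := ∀ (n : Int) (k : Int) (tasks : List Int), Dom_solve n k tasks → Spec_solve n k tasks (solve n k tasks)

-- ===== LEMMAS AND PROOFS =====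

-- number of elements ≤ key: the common value both loops compute per position
def pvCnt (s : List Int) (key : Int) : Nat := s.countP (fun x => decide (x ≤ key))

theorem pvCnt_le_length (s : List Int) (key : Int) : pvCnt s key ≤ s.length :=
  List.countP_le_length

-- on a sorted list, position j holds a value ≤ key iff j is below the count of such values
theorem pvCnt_spec (s : List Int) (hs : s.Pairwise (· ≤ ·)) (key : Int) :
    ∀ j (hj : j < s.length), (s[j] ≤ key ↔ j < pvCnt s key) := by
  induction s with
  | nil => intro j hj; simp at hj
  | cons a xs ih =>
    rcases List.pairwise_cons.mp hs with ⟨ha, hxs⟩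
    intro j hj
    cases j with
    | zero =>
      simp only [List.getElem_cons_zero, pvCnt, List.countP_cons]
      by_cases h : a ≤ key
      · simp [h]
      · have hz : xs.countP (fun x => decide (x ≤ key)) = 0 := by
          rw [List.countP_eq_zero]
          intro b hb
          have := ha b hb
          simp only [decide_eq_true_eq]
          omega
        simp [h, hz]
    | succ j =>
      simp only [List.getElem_cons_succ]
      have hj' : j < xs.length := by simpa using hj
      have := ih hxs j hj'
      simp only [pvCnt, List.countP_cons] at *
      by_cases h : a ≤ key
      · have he : (if decide (a ≤ key) = true then 1 else 0) = 1 := by simp [h]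
        rw [he]
        omega
      · have hz : xs.countP (fun x => decide (x ≤ key)) = 0 := by
          rw [List.countP_eq_zero]
          intro b hb
          have := ha b hb
          simp only [decide_eq_true_eq]
          omega
        have hbj : ¬ xs[j] ≤ key := by
          have := ha xs[j] (List.getElem_mem hj')
          omega
        simp [hz, h, hbj]

theorem pvAdvance_eq (s : List Int) (hs : s.Pairwise (· ≤ ·)) (t k : Int) (r : Nat)
    (hr : r ≤ pvCnt s (t + k)) : pvAdvance s t k r = pvCnt s (t + k) := by
  fun_induction pvAdvance s t k r with
  | case1 r h hle ih =>
    apply ih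
    have := (pvCnt_spec s hs (t + k) r h).mp (by omega)
    omega
  | case2 r h hle =>
    have := pvCnt_spec s hs (t + k) r h
    omega
  | case3 r h =>
    have := pvCnt_le_length s (t + k)
    omega

theorem pvBisectRight_eq (s : List Int) (hs : s.Pairwise (· ≤ ·)) (key : Int) (lo hi : Nat)
    (hlo : lo ≤ pvCnt s key) (hhi : pvCnt s key ≤ hi) (hlen : hi ≤ s.length) :
    pvBisectRight s key lo hi = pvCnt s key := by
  fun_induction pvBisectRight s key lo hi with
  | case1 lo hi h mid hlt ih =>
    apply ih hlo _ (by omega)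
    have hmid : mid < s.length := by omega
    rw [List.getD_eq_getElem s 0 hmid] at hlt
    have := pvCnt_spec s hs key mid hmid
    omega
  | case2 lo hi h mid hge ih =>
    apply ih _ hhi hlen
    have hmid : mid < s.length := by omega
    rw [List.getD_eq_getElem s 0 hmid] at hge
    have := (pvCnt_spec s hs key mid hmid).mp (by omega)
    omega
  | case3 lo hi h =>
    omega

theorem pvCnt_mono (s : List Int) {a b : Int} (h : a ≤ b) : pvCnt s a ≤ pvCnt s b := by
  apply List.countP_mono_left
  intro x _ hx
  simp only [decide_eq_true_eq] at *
  omega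

-- the sorted order lifts to the enumerated pairs' values
theorem isChain_enumerate (s : List Int) (R : Int → Int → Prop) (hp : s.Pairwise R) :
    ∀ i : Int, List.IsChain (fun p q : Int × Int => R p.2 q.2) (PySem.List.enumerate s i) := by
  induction s with
  | nil => intro i; simp [PySem.List.enumerate_nil]
  | cons a xs ih =>
    rcases List.pairwise_cons.mp hp with ⟨ha, hxs⟩
    intro i
    rw [PySem.List.enumerate_cons, List.isChain_cons]
    refine ⟨?_, ih hxs (i + 1)⟩
    intro b hb
    cases xs with
    | nil => simp [PySem.List.enumerate_nil] at hb
    | cons c ys =>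
      rw [PySem.List.enumerate_cons] at hb
      simp only [List.head?_cons, Option.mem_def, Option.some.injEq] at hb
      subst hb
      exact ha c List.mem_cons_self

-- main loop equivalence: the carried two-pointer state equals the per-element count
theorem pvLoop_eq (s : List Int) (hs : s.Pairwise (· ≤ ·)) (k : Int) :
    ∀ (ps : List (Int × Int)) (r : Nat) (m : Int),
      List.IsChain (fun p q : Int × Int => pvCnt s (p.2 + k) ≤ pvCnt s (q.2 + k)) ps →
      (∀ p, ps.head? = some p → r ≤ pvCnt s (p.2 + k)) →
      (ps.foldl (fun (st : Nat × Int) p =>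
          let r' := pvAdvance s p.2 k st.1
          (r', max st.2 ((r' : Int) - p.1))) (r, m)).2
      = ps.foldl (fun best p => max best ((pvBisectRight s (p.2 + k) 0 s.length : Int) - p.1)) m := by
  intro ps
  induction ps with
  | nil => intro r m _ _; rfl
  | cons p ps ih =>
    intro r m hchain hhead
    rcases List.isChain_cons.mp hchain with ⟨hrel, htail⟩
    have hr : r ≤ pvCnt s (p.2 + k) := hhead p rfl
    have hadv : pvAdvance s p.2 k r = pvCnt s (p.2 + k) := pvAdvance_eq s hs p.2 k r hr
    have hbis : pvBisectRight s (p.2 + k) 0 s.length = pvCnt s (p.2 + k) :=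
      pvBisectRight_eq s hs (p.2 + k) 0 s.length (Nat.zero_le _)
        (pvCnt_le_length s (p.2 + k)) le_rfl
    simp only [List.foldl_cons, hadv, hbis]
    apply ih
    · exact htail
    · intro q hq
      have := hrel q hq
      omega

theorem solve_eq_alt (n k : Int) (tasks : List Int) : solve n k tasks = solve_alt n k tasks := by
  unfold solve solve_alt
  have hs : (PySem.List.sorted tasks (fun x => x) false).Pairwise (· ≤ ·) :=
    PySem.List.sorted_pairwise tasks (fun x => x)
  apply pvLoop_eq _ hs
  · exact isChain_enumerate (PySem.List.sorted tasks (fun x => x) false)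
      (fun a b => pvCnt (PySem.List.sorted tasks (fun x => x) false) (a + k)
        ≤ pvCnt (PySem.List.sorted tasks (fun x => x) false) (b + k))
      (hs.imp (fun hab => pvCnt_mono _ (by omega))) 0
  · intro p _
    exact Nat.zero_le _

-- ===== VERDICT (by name: the statement is the Claim_ definition above) =====
theorem solve_spec : Claim_equal_solve := by
  intro n k tasks _
  unfold Spec_solve
  exact solve_eq_alt n k tasks
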